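-- pv_equiv track=rewrite | github.com/yassernamez03/Finance-Chatbot | functions.py | extract_item_predict
-- ===== SOURCE A (Python) =====
-- def extract_item_predict(input_):
--     sentences =  ["predict",'predictions about',"can you predict"]
--
--     sentences.sort(key=len, reverse=True)
--     if len(input_.split()) == 1:
--         return input_.split()[0].strip()
--     else:
--         index = -1
--         for sentence in sentences:
--             if sentence.lower() in input_:
--                 index = input_.find(sentence)+len(sentence)
--
--         if index != -1:
--             new_string = input_[index:]
--             word = new_string.split()[0]
--             return word
--         else:
--             return None
-- ===== SOURCE B (Python) =====
-- def extract_item_predict(input_):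
--     # "predict" is a substring of every candidate phrase and A keeps the LAST
--     # match in length-descending order, so the answer is governed by "predict"
--     # alone: one direct lookup replaces the sort + scan-keep-last loop.
--     if len(input_.split()) == 1:
--         return input_.split()[0].strip()
--     if "predict" in input_:
--         idx = input_.find("predict") + len("predict")
--         return input_[idx:].split()[0]
--     return None
-- ===== Notes on version B (the rewrite author's own statement) =====
-- stated objective: simpler
-- what changed: B drops the phrase list, the length sort and the scan-keep-last loop entirely: since 'predict' is a substring of all three phrases and the loop keeps the last (shortest) match, a single 'predict' membership test and find() gives the same result.
import Mathlib
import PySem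

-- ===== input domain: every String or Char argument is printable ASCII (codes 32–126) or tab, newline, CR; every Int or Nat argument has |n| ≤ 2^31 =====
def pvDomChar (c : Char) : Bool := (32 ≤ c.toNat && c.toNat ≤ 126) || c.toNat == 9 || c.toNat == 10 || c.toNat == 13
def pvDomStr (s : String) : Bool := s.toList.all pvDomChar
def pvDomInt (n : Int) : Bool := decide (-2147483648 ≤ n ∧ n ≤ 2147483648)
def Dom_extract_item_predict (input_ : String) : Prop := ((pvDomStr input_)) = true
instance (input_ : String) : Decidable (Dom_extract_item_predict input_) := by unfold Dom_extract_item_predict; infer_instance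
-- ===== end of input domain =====

-- B replaces A's phrase list, length sort and scan-keep-last loop by one direct 'predict' lookup (simpler).

-- ===== PORT A =====
def extract_item_predict (input_ : String) : Option String :=
  let sentences := PySem.List.sorted ["predict", "predictions about", "can you predict"]
      (fun s => PySem.Str.len s) true
  if (PySem.Str.split₀ input_).length = 1 then
    some (PySem.Str.strip (PySem.List.pyGetD (PySem.Str.split₀ input_) 0 ""))
  else
    let index := sentences.foldl (fun index sentence =>
      if PySem.Str.isIn (PySem.Str.lower sentence) input_ then
        PySem.Str.find input_ sentence + (PySem.Str.len sentence : Int)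
      else index) (-1)
    if index ≠ -1 then
      let new_string := PySem.Str.slice input_ (some index) none
      -- new_string.split()[0]: head? is none exactly where Python raises IndexError (outside Pre_)
      match (PySem.Str.split₀ new_string).head? with
      | some word => some word
      | none => none
    else none

-- ===== PORT B =====
def extract_item_predict_alt (input_ : String) : Option String :=
  let words := PySem.Str.split₀ input_
  if words.length = 1 then
    some (PySem.Str.strip (words.headD ""))
  else if PySem.Str.isIn "predict" input_ then
    let idx := PySem.Str.find input_ "predict" + (PySem.Str.len "predict" : Int)
    -- tail.split()[0]: head? is none exactly where Python raises IndexError (outside Pre_)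
    (PySem.Str.split₀ (PySem.Str.slice input_ (some idx) none)).head?
  else none

-- ===== PRECONDITION & SPEC =====
-- Pre_ excludes multi-word inputs whose text after the first 'predict' is empty or all whitespace,
-- on which A (and B) raise IndexError from new_string.split()[0].
def Pre_extract_item_predict (input_ : String) : Prop :=
  (PySem.Str.split₀ input_).length = 1 ∨ PySem.Str.isIn "predict" input_ = false ∨
    PySem.Str.split₀ (PySem.Str.slice input_ (some (PySem.Str.find input_ "predict" + 7)) none) ≠ []
instance (input_ : String) : Decidable (Pre_extract_item_predict input_) := by
  unfold Pre_extract_item_predict; infer_instance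
def pvWitness_extract_item_predict : String := "can you predict rain"

def Spec_extract_item_predict (input_ : String) (out : Option String) : Prop := out = extract_item_predict_alt input_
instance (input_ : String) (out : Option String) : Decidable (Spec_extract_item_predict input_ out) := by unfold Spec_extract_item_predict; infer_instance

-- ===== CLAIM (what is proved, stated in full; the proofs are below) =====
def Claim_equal_extract_item_predict : Prop := ∀ (input_ : String), Dom_extract_item_predict input_ → Pre_extract_item_predict input_ → Spec_extract_item_predict input_ (extract_item_predict input_)

-- ===== LEMMAS AND PROOFS =====

-- the length-descending stable sort of A's literal phrase list
lemma pv_sorted_lit :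
    PySem.List.sorted ["predict", "predictions about", "can you predict"]
      (fun s => PySem.Str.len s) true
      = ["predictions about", "can you predict", "predict"] := by decide

-- if 'predict' does not occur in the input, neither longer phrase does
lemma pv_no_predict_no_phrase (input_ : String) (p : String)
    (hp : ("predict".toList) <:+: p.toList)
    (h : PySem.Str.isIn "predict" input_ = false) :
    PySem.Str.isIn p input_ = false := by
  by_contra hc
  have hIn : PySem.Str.isIn p input_ = true := by
    cases hpi : PySem.Str.isIn p input_ with
    | true => rfl
    | false => exact absurd hpi hc
  have h1 : p.toList <:+: input_.toList := (PySem.Str.isIn_iff_infix p input_).mp hIn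
  have h2 : ("predict".toList) <:+: input_.toList := hp.trans h1
  have := (PySem.Str.isIn_iff_infix "predict" input_).mpr h2
  rw [h] at this
  exact Bool.false_ne_true this

-- ===== VERDICT (by name: the statement is the Claim_ definition above) =====
theorem extract_item_predict_spec : Claim_equal_extract_item_predict := by
  intro input_ _ _
  unfold Spec_extract_item_predict extract_item_predict extract_item_predict_alt
  rw [pv_sorted_lit]
  by_cases h1 : (PySem.Str.split₀ input_).length = 1
  · simp only [h1, if_true]
    rcases hw : PySem.Str.split₀ input_ with _ | ⟨w, ws⟩
    · rw [hw] at h1; simp at h1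
    · simp [PySem.List.pyGetD, PySem.List.pyGet?, PySem.List.pyIdx?]
  · simp only [List.foldl, if_neg h1]
    by_cases hp : PySem.Str.isIn "predict" input_ = true
    · have hl : PySem.Str.lower "predict" = "predict" := by decide
      have hlen : (PySem.Str.len "predict" : Int) = 7 := by decide
      simp only [hl, hp, if_true, hlen]
      have hf : (0:Int) ≤ PySem.Str.find input_ "predict" := by
        rw [PySem.Str.find_nonneg_iff]
        exact (PySem.Str.isIn_iff_infix _ _).mp hp
      have hne : PySem.Str.find input_ "predict" + 7 ≠ -1 := by omega
      simp only [if_pos hne]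
      cases (PySem.Str.split₀ (PySem.Str.slice input_ (some (PySem.Str.find input_ "predict" + 7)) none)).head? <;> rfl
    · have hp' : PySem.Str.isIn "predict" input_ = false := by
        cases hpi : PySem.Str.isIn "predict" input_ with
        | true => exact absurd hpi hp
        | false => rfl
      have h2 : PySem.Str.isIn "can you predict" input_ = false :=
        pv_no_predict_no_phrase input_ _ (by decide) hp'
      have h3 : PySem.Str.isIn "predictions about" input_ = false :=
        pv_no_predict_no_phrase input_ _ (by decide) hp'
      simp only [PySem.Str.isIn_eq] at hp' h2 h3
      have hp2 : PySem.Chars.isIn ['p','r','e','d','i','c','t'] input_.toList = false := hp'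
      have h2' : PySem.Chars.isIn ['c','a','n',' ','y','o','u',' ','p','r','e','d','i','c','t'] input_.toList = false := h2
      have h3' : PySem.Chars.isIn ['p','r','e','d','i','c','t','i','o','n','s',' ','a','b','o','u','t'] input_.toList = false := h3
      have hl1 : PySem.Str.lower "predictions about" = "predictions about" := by decide
      have hl2 : PySem.Str.lower "can you predict" = "can you predict" := by decide
      have hl3 : PySem.Str.lower "predict" = "predict" := by decide
      simp [hl1, hl2, hl3, h2', h3', hp2]
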